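-- pv_equiv track=rewrite | github.com/S2606/Project_Euler | exp12.py | divisible_count
-- ===== SOURCE A (Python) =====
-- def divisible_count(a):
--     count = 0
--     for i in range(1,a):
--         if a % i == 0:
--             count=count+1
--     if count>=500:
--         return True
--     else:
--         return False
-- ===== SOURCE B (Python) =====
-- def divisible_count(a):
--     # Count divisors of a by trial division up to sqrt(a): each small divisor
--     # pairs with its cofactor, a perfect-square root counts once.  The number
--     # of proper divisors is that total discounting a itself.
--     if a < 2:
--         return False
--     count = 0
--     i = 1
--     while i * i <= a:
--         if a % i == 0:
--             count += 1 if i * i == a else 2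
--         i += 1
--     return count - 1 >= 500
-- ===== Notes on version B (the rewrite author's own statement) =====
-- stated objective: faster
-- what changed: Replaces the linear scan over all candidates below a with trial division up to the square root, counting each small divisor together with its cofactor (a perfect-square root once) and then discounting a itself.
import Mathlib
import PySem

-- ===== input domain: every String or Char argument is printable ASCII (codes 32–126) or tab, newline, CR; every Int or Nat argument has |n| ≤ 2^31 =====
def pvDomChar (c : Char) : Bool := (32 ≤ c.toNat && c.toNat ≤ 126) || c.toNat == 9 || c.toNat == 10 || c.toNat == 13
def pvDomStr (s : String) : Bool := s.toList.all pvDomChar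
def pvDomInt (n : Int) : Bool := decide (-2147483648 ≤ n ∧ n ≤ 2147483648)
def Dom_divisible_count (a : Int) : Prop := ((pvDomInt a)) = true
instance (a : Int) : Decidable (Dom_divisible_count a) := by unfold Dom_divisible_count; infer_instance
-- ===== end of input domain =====

-- B replaces A's linear scan over [1, a) with trial division up to the square root (each small
-- divisor counted with its cofactor, a square root once, then discounting a itself).

-- ===== PORT A =====
def divisible_count (a : Int) : Bool :=
  let count : Int :=
    (PySem.List.pyRange 1 a 1).foldl
      (fun count i => if PySem.Int.mod a i == 0 then count + 1 else count) 0
  if count ≥ 500 then true else false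

-- ===== PORT B =====
-- the while loop of Source B: i increases while i*i ≤ a, accumulating count
def bLoop (a : Int) (count : Int) (i : Int) : Int :=
  if h : i * i ≤ a then
    bLoop a (count + if PySem.Int.mod a i == 0 then (if i * i == a then 1 else 2) else 0) (i + 1)
  else count
termination_by (a + 1 - i).toNat
decreasing_by
  have h0 : (0 : Int) ≤ a := le_trans (mul_self_nonneg i) h
  have h1 : 2 * i - 1 ≤ a := by nlinarith [sq_nonneg (i - 1)]
  omega

def divisible_count_alt (a : Int) : Bool :=
  if a < 2 then false
  else decide (bLoop a 0 1 - 1 ≥ 500)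

-- ===== PRECONDITION & SPEC =====
def Spec_divisible_count (a : Int) (out : Bool) : Prop := out = divisible_count_alt a
instance (a : Int) (out : Bool) : Decidable (Spec_divisible_count a out) := by unfold Spec_divisible_count; infer_instance

-- ===== CLAIM (what is proved, stated in full; the proofs are below) =====
def Claim_equal_divisible_count : Prop := ∀ (a : Int), Dom_divisible_count a → Spec_divisible_count a (divisible_count a)

-- ===== LEMMAS AND PROOFS =====

-- weight of a candidate divisor d ≤ sqrt n in B's count
def w (n d : Nat) : Nat := if d ∣ n then (if d * d = n then 1 else 2) else 0

-- A's foldl is a countP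
theorem foldl_count (p : Int → Bool) (l : List Int) (c : Int) :
    l.foldl (fun c i => if p i then c + 1 else c) c = c + l.countP p := by
  induction l generalizing c with
  | nil => simp
  | cons x xs ih =>
    simp only [List.foldl_cons, List.countP_cons, ih]
    by_cases h : p x <;> simp [h, add_right_comm, add_assoc]

theorem countP_range_eq_sum (m : Nat) (p : Nat → Prop) [DecidablePred p] :
    (List.range m).countP (fun k => decide (p k)) = ∑ k ∈ Finset.range m, if p k then 1 else 0 := by
  induction m with
  | zero => simp
  | succ m ih =>
    rw [List.range_succ, List.countP_append, Finset.sum_range_succ, ih]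
    by_cases h : p m <;> simp [h]

-- the branch body of bLoop, on a cast input, is exactly the weight w
theorem term_eq_w (n i : Nat) :
    (if PySem.Int.mod (n : Int) (i : Int) == 0 then (if (i : Int) * i == (n : Int) then (1 : Int) else 2) else 0)
      = ((w n i : Nat) : Int) := by
  unfold w
  rw [PySem.Int.mod_natCast]
  by_cases hd : i ∣ n
  · have h1 : n % i = 0 := Nat.dvd_iff_mod_eq_zero.mp hd
    by_cases hsq : i * i = n
    · have : (i : Int) * i = (n : Int) := by exact_mod_cast hsq
      simp [h1, hd, hsq, this]
    · have : ¬ ((i : Int) * i = (n : Int)) := by exact_mod_cast hsq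
      simp [h1, hd, hsq, this]
  · have h1 : n % i ≠ 0 := fun hz => hd (Nat.dvd_iff_mod_eq_zero.mpr hz)
    have h3 : ¬ ((i : Int) ∣ (n : Int)) := fun hc => hd (by exact_mod_cast hc)
    simp [hd, h3]

-- B's loop computes the weighted sum over Icc i (sqrt n)
theorem bLoop_eq (n : Nat) (j : Nat) : ∀ (i : Nat) (c : Int), 1 ≤ i → Nat.sqrt n + 1 - i ≤ j →
    bLoop (n : Int) c (i : Int) = c + ((∑ d ∈ Finset.Icc i (Nat.sqrt n), w n d : Nat) : Int) := by
  induction j with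
  | zero =>
    intro i c hi hj
    have hni : n < i ^ 2 := Nat.sqrt_lt'.mp (by omega)
    rw [bLoop]
    have hcond : ¬ ((i : Int) * i ≤ (n : Int)) := by
      have : (n : Int) < (i : Int) * i := by exact_mod_cast (by nlinarith [hni] : n < i * i)
      omega
    rw [dif_neg hcond, Finset.Icc_eq_empty (by omega)]
    simp
  | succ j ih =>
    intro i c hi hj
    rw [bLoop]
    by_cases hle : i ≤ Nat.sqrt n
    · have hiin : i * i ≤ n := Nat.le_sqrt.mp hle
      have hcond : ((i : Int) * i ≤ (n : Int)) := by exact_mod_cast hiin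
      rw [dif_pos hcond]
      have hicc : Finset.Icc i (Nat.sqrt n) = insert i (Finset.Icc (i + 1) (Nat.sqrt n)) := by
        rw [Finset.Icc_add_one_left_eq_Ioc, Finset.Ioc_insert_left hle]
      have hnotmem : i ∉ Finset.Icc (i + 1) (Nat.sqrt n) := by simp
      rw [hicc, Finset.sum_insert hnotmem, term_eq_w n i]
      have hcast : ((i : Int) + 1) = ((i + 1 : Nat) : Int) := by push_cast; ring
      rw [hcast, ih (i + 1) _ (by omega) (by omega)]
      push_cast
      ring
    · have hni : n < i ^ 2 := Nat.sqrt_lt'.mp (by omega)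
      have hcond : ¬ ((i : Int) * i ≤ (n : Int)) := by
        have : (n : Int) < (i : Int) * i := by exact_mod_cast (by nlinarith [hni] : n < i * i)
        omega
      rw [dif_neg hcond, Finset.Icc_eq_empty (by omega)]
      simp

-- the pairing d ↦ n / d between divisors above sqrt n and non-square-root divisors below
theorem pairing (n : Nat) (hn : 2 ≤ n) :
    ((Finset.Ioc (Nat.sqrt n) n).filter (· ∣ n)).card
      = ((Finset.Ioc 0 (Nat.sqrt n)).filter (fun d => d ∣ n ∧ d * d ≠ n)).card := by
  apply Finset.card_bij' (fun d _ => n / d) (fun e _ => n / e)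
  · intro d hd
    simp only [Finset.mem_filter, Finset.mem_Ioc] at hd ⊢
    obtain ⟨⟨hsd, hdn⟩, hdvd⟩ := hd
    have hd0 : 0 < d := by omega
    have hn0 : 0 < n := by omega
    have hnd2 : n < d * d := by have := Nat.sqrt_lt'.mp hsd; nlinarith [this]
    have hedvd : n / d ∣ n := Nat.div_dvd_of_dvd hdvd
    have he0 : 0 < n / d := Nat.div_pos (Nat.le_of_dvd hn0 hdvd) hd0
    have hmul : n / d * d = n := Nat.div_mul_cancel hdvd
    have hlt : n / d < d := by nlinarith [hmul]
    have hee : n / d * (n / d) < n := by nlinarith [hmul]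
    refine ⟨⟨he0, Nat.le_sqrt.mpr (le_of_lt hee)⟩, hedvd, by omega⟩
  · intro e he
    simp only [Finset.mem_filter, Finset.mem_Ioc] at he ⊢
    obtain ⟨⟨he0, hes⟩, hedvd, hene⟩ := he
    have hn0 : 0 < n := by omega
    have hee : e * e < n := lt_of_le_of_ne (Nat.le_sqrt.mp hes) hene
    have hddvd : n / e ∣ n := Nat.div_dvd_of_dvd hedvd
    have hmul : n / e * e = n := Nat.div_mul_cancel hedvd
    have hgt : e < n / e := by nlinarith [hmul]
    have hd2 : n < (n / e) ^ 2 := by nlinarith [hmul]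
    exact ⟨⟨Nat.sqrt_lt'.mpr hd2, Nat.le_of_dvd hn0 hddvd⟩, hddvd⟩
  · intro d hd
    simp only [Finset.mem_filter, Finset.mem_Ioc] at hd
    exact Nat.div_div_self hd.2 (by omega)
  · intro e he
    simp only [Finset.mem_filter, Finset.mem_Ioc] at he
    exact Nat.div_div_self he.2.1 (by omega)

-- core identity: proper-divisor count + 1 = B's weighted sum up to sqrt n
theorem key (n : Nat) (hn : 2 ≤ n) :
    ((∑ k ∈ Finset.range (n - 1), if (k + 1) ∣ n then 1 else 0) + 1 : Nat)
      = ∑ d ∈ Finset.Icc 1 (Nat.sqrt n), w n d := by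
  have hs1 : 1 ≤ Nat.sqrt n := by
    have : 1 * 1 ≤ n := by omega
    exact Nat.le_sqrt.mpr this
  have hsn : Nat.sqrt n ≤ n := Nat.sqrt_le_self n
  have f := fun d : Nat => if d ∣ n then (1 : Nat) else 0
  -- step 1: range sum = sum over Ico 1 n
  have h1 : (∑ k ∈ Finset.range (n - 1), if (k + 1) ∣ n then 1 else 0)
      = ∑ d ∈ Finset.Ico 1 n, if d ∣ n then (1 : Nat) else 0 := by
    rw [Finset.sum_Ico_eq_sum_range]
    apply Finset.sum_congr rfl
    intro k _
    rw [Nat.add_comm 1 k]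
  -- step 2: add the term d = n
  have h2 : (∑ d ∈ Finset.Ico 1 n, if d ∣ n then (1 : Nat) else 0) + 1
      = ∑ d ∈ Finset.Ioc 0 n, if d ∣ n then (1 : Nat) else 0 := by
    have hset : Finset.Ioc 0 n = Finset.Ico 1 (n + 1) := by ext x; simp; omega
    rw [hset, Finset.sum_Ico_succ_top (by omega), if_pos dvd_rfl]
  -- step 3: split the full sum at sqrt n
  have h3 : (∑ d ∈ Finset.Ioc 0 (Nat.sqrt n), if d ∣ n then (1 : Nat) else 0)
      + (∑ d ∈ Finset.Ioc (Nat.sqrt n) n, if d ∣ n then (1 : Nat) else 0)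
      = ∑ d ∈ Finset.Ioc 0 n, if d ∣ n then (1 : Nat) else 0 :=
    Finset.sum_Ioc_consecutive _ (by omega) hsn
  -- step 4: the upper part equals the non-square-root indicator sum on the lower range
  have h4 : (∑ d ∈ Finset.Ioc (Nat.sqrt n) n, if d ∣ n then (1 : Nat) else 0)
      = ∑ d ∈ Finset.Ioc 0 (Nat.sqrt n), if d ∣ n ∧ d * d ≠ n then (1 : Nat) else 0 := by
    rw [← Finset.card_filter, ← Finset.card_filter]
    exact pairing n hn
  -- step 5: w is the sum of the two indicators, pointwise
  have h5 : (∑ d ∈ Finset.Icc 1 (Nat.sqrt n), w n d)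
      = (∑ d ∈ Finset.Ioc 0 (Nat.sqrt n), if d ∣ n then (1 : Nat) else 0)
      + ∑ d ∈ Finset.Ioc 0 (Nat.sqrt n), if d ∣ n ∧ d * d ≠ n then (1 : Nat) else 0 := by
    have hset : Finset.Icc 1 (Nat.sqrt n) = Finset.Ioc 0 (Nat.sqrt n) := by ext x; simp; omega
    rw [hset, ← Finset.sum_add_distrib]
    apply Finset.sum_congr rfl
    intro d _
    unfold w
    by_cases hd : d ∣ n
    · by_cases hsq : d * d = n <;> simp [hd, hsq]
    · simp [hd]
  omega
  -- (omega closes: h1..h5 chain the equalities)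

theorem divisible_count_spec' : ∀ (a : Int), divisible_count a = divisible_count_alt a := by
  intro a
  by_cases ha : a < 2
  · simp only [divisible_count, divisible_count_alt, if_pos ha]
    rw [PySem.List.pyRange_one_eq_nil (by omega)]
    simp
  · have hn2 : 2 ≤ a.toNat := by omega
    set n := a.toNat with hn
    have han : a = (n : Int) := by omega
    -- A's count
    have hA : (PySem.List.pyRange 1 a 1).foldl
        (fun count i => if PySem.Int.mod a i == 0 then count + 1 else count) 0
        = (((∑ k ∈ Finset.range (n - 1), if (k + 1) ∣ n then 1 else 0 : Nat)) : Int) := by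
      rw [foldl_count (fun i => PySem.Int.mod a i == 0), zero_add]
      rw [PySem.List.pyRange_one, List.countP_map]
      have hlen : (a - 1).toNat = n - 1 := by omega
      have hfun : ((fun i => PySem.Int.mod a i == 0) ∘ (fun k : Nat => (1 : Int) + (k : Int)))
          = (fun k : Nat => decide ((k + 1) ∣ n)) := by
        funext k
        simp only [Function.comp]
        have h1 : (1 : Int) + (k : Int) = ((k + 1 : Nat) : Int) := by push_cast; ring
        rw [han, h1, PySem.Int.mod_natCast]
        by_cases hd : (k + 1) ∣ n
        · have h0 : n % (k + 1) = 0 := Nat.dvd_iff_mod_eq_zero.mp hd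
          simp [hd, h0]
        · have h0 : n % (k + 1) ≠ 0 := fun hz => hd (Nat.dvd_iff_mod_eq_zero.mpr hz)
          have h3 : ¬ (((k : Int) + 1) ∣ (n : Int)) := fun hc => hd (by exact_mod_cast hc)
          simp [hd, h3]
      rw [hlen, hfun, countP_range_eq_sum (n - 1) (fun k => (k + 1) ∣ n)]
    -- B's count
    have hB : bLoop a 0 1 = ((∑ d ∈ Finset.Icc 1 (Nat.sqrt n), w n d : Nat) : Int) := by
      have h1 : (1 : Int) = ((1 : Nat) : Int) := by norm_num
      rw [han, h1, bLoop_eq n (Nat.sqrt n + 1) 1 0 (by omega) (by omega), zero_add]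
    simp only [divisible_count, divisible_count_alt, if_neg ha]
    rw [hA, hB, ← key n hn2]
    have hc : (((∑ k ∈ Finset.range (n - 1), if (k + 1) ∣ n then 1 else 0 : Nat) + 1 : Nat) : Int) - 1
        = ((∑ k ∈ Finset.range (n - 1), if (k + 1) ∣ n then 1 else 0 : Nat) : Int) := by
      push_cast; ring
    rw [hc]
    by_cases h : ((∑ k ∈ Finset.range (n - 1), if (k + 1) ∣ n then 1 else 0 : Nat) : Int) ≥ 500
    · rw [if_pos h, eq_comm, decide_eq_true_iff]
      exact h
    · rw [if_neg h, eq_comm, decide_eq_false_iff_not]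
      exact h

-- ===== VERDICT (by name: the statement is the Claim_ definition above) =====
theorem divisible_count_spec : Claim_equal_divisible_count := by
  intro a _
  exact divisible_count_spec' a
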